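-- pv_equiv track=rewrite | github.com/DeRobyJ/IdleBank-Alpha | game_util.py | get_titlecode_forlvl
-- ===== SOURCE A (Python) =====
-- def get_titlecode_forlvl(level):
--     code = 0
--     for tier_level in [
--             10, 20, 30, 40, 50, 70, 100, 150, 200, 300, 450, 600, 1000]:
--         if level < tier_level:
--             return code
--         code += 1
--     return code
-- ===== SOURCE B (Python) =====
-- import bisect
--
-- _THRESHOLDS = [10, 20, 30, 40, 50, 70, 100, 150, 200, 300, 450, 600, 1000]
--
-- def get_titlecode_forlvl(level):
--     return bisect.bisect_right(_THRESHOLDS, level)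
-- ===== Notes on version B (the rewrite author's own statement) =====
-- stated objective: idiomatic
-- what changed: Replaced the sequential scan with an early-return counter by a binary search (bisect_right) over the same ascending threshold list.
import Mathlib
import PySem

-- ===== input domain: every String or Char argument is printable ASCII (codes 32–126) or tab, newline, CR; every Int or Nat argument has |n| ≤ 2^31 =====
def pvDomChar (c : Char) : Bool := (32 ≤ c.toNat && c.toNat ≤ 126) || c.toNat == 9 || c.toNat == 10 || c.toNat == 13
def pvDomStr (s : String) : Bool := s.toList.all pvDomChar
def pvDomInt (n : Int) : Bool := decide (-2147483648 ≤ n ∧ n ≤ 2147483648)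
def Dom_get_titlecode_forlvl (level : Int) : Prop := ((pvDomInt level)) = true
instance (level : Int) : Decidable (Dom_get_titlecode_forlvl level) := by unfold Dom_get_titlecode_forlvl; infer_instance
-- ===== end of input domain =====

-- B replaces A's sequential scan with a binary search (bisect_right) over the same ascending threshold list (idiomatic; no speed claim).


-- ===== PORT A =====
-- the for-loop with early return, as structural recursion over the threshold list
def pvALoop (level : Int) (code : Int) : List Int → Int
  | [] => code
  | t :: ts => if level < t then code else pvALoop level (code + 1) ts

def get_titlecode_forlvl (level : Int) : Int :=
  pvALoop level 0 [10, 20, 30, 40, 50, 70, 100, 150, 200, 300, 450, 600, 1000]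

-- ===== PORT B =====
-- bisect.bisect_right's loop: while lo < hi: mid = (lo+hi)//2; if x < a[mid]: hi = mid else lo = mid+1
-- indices are always in range here, so a[mid] is ported as getD (exact on this call)
def pvBisectRight (a : List Int) (x : Int) (lo hi : Nat) : Nat :=
  if h : lo < hi then
    let mid := (lo + hi) / 2
    if x < a.getD mid 0 then pvBisectRight a x lo mid
    else pvBisectRight a x (mid + 1) hi
  else lo
termination_by hi - lo
decreasing_by all_goals omega

def pvThresholds : List Int := [10, 20, 30, 40, 50, 70, 100, 150, 200, 300, 450, 600, 1000]

def get_titlecode_forlvl_alt (level : Int) : Int :=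
  (pvBisectRight pvThresholds level 0 pvThresholds.length : Int)

-- ===== PRECONDITION & SPEC =====
def Spec_get_titlecode_forlvl (level : Int) (out : Int) : Prop := out = get_titlecode_forlvl_alt level
instance (level : Int) (out : Int) : Decidable (Spec_get_titlecode_forlvl level out) := by unfold Spec_get_titlecode_forlvl; infer_instance

-- ===== CLAIM (what is proved, stated in full; the proofs are below) =====
def Claim_equal_get_titlecode_forlvl : Prop := ∀ (level : Int), Dom_get_titlecode_forlvl level → Spec_get_titlecode_forlvl level (get_titlecode_forlvl level)

-- ===== LEMMAS AND PROOFS =====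

-- ===== VERDICT (by name: the statement is the Claim_ definition above) =====
set_option maxRecDepth 4000 in
theorem get_titlecode_forlvl_spec : Claim_equal_get_titlecode_forlvl := by
  intro level _
  unfold Spec_get_titlecode_forlvl get_titlecode_forlvl get_titlecode_forlvl_alt pvThresholds
  by_cases c0 : level < 10
  · have d1 : level < 20 := by omega
    have d2 : level < 30 := by omega
    have d3 : level < 40 := by omega
    have d4 : level < 50 := by omega
    have d5 : level < 70 := by omega
    have d6 : level < 100 := by omega
    have d7 : level < 150 := by omega
    have d8 : level < 200 := by omega
    have d9 : level < 300 := by omega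
    have d10 : level < 450 := by omega
    have d11 : level < 600 := by omega
    have d12 : level < 1000 := by omega
    simp [pvBisectRight, pvALoop, *]
  by_cases c1 : level < 20
  · have d2 : level < 30 := by omega
    have d3 : level < 40 := by omega
    have d4 : level < 50 := by omega
    have d5 : level < 70 := by omega
    have d6 : level < 100 := by omega
    have d7 : level < 150 := by omega
    have d8 : level < 200 := by omega
    have d9 : level < 300 := by omega
    have d10 : level < 450 := by omega
    have d11 : level < 600 := by omega
    have d12 : level < 1000 := by omega
    simp [pvBisectRight, pvALoop, *]
  by_cases c2 : level < 30
  · have d3 : level < 40 := by omega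
    have d4 : level < 50 := by omega
    have d5 : level < 70 := by omega
    have d6 : level < 100 := by omega
    have d7 : level < 150 := by omega
    have d8 : level < 200 := by omega
    have d9 : level < 300 := by omega
    have d10 : level < 450 := by omega
    have d11 : level < 600 := by omega
    have d12 : level < 1000 := by omega
    simp [pvBisectRight, pvALoop, *]
  by_cases c3 : level < 40
  · have d4 : level < 50 := by omega
    have d5 : level < 70 := by omega
    have d6 : level < 100 := by omega
    have d7 : level < 150 := by omega
    have d8 : level < 200 := by omega
    have d9 : level < 300 := by omega
    have d10 : level < 450 := by omega
    have d11 : level < 600 := by omega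
    have d12 : level < 1000 := by omega
    simp [pvBisectRight, pvALoop, *]
  by_cases c4 : level < 50
  · have d5 : level < 70 := by omega
    have d6 : level < 100 := by omega
    have d7 : level < 150 := by omega
    have d8 : level < 200 := by omega
    have d9 : level < 300 := by omega
    have d10 : level < 450 := by omega
    have d11 : level < 600 := by omega
    have d12 : level < 1000 := by omega
    simp [pvBisectRight, pvALoop, *]
  by_cases c5 : level < 70
  · have d6 : level < 100 := by omega
    have d7 : level < 150 := by omega
    have d8 : level < 200 := by omega
    have d9 : level < 300 := by omega
    have d10 : level < 450 := by omega
    have d11 : level < 600 := by omega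
    have d12 : level < 1000 := by omega
    simp [pvBisectRight, pvALoop, *]
  by_cases c6 : level < 100
  · have d7 : level < 150 := by omega
    have d8 : level < 200 := by omega
    have d9 : level < 300 := by omega
    have d10 : level < 450 := by omega
    have d11 : level < 600 := by omega
    have d12 : level < 1000 := by omega
    simp [pvBisectRight, pvALoop, *]
  by_cases c7 : level < 150
  · have d8 : level < 200 := by omega
    have d9 : level < 300 := by omega
    have d10 : level < 450 := by omega
    have d11 : level < 600 := by omega
    have d12 : level < 1000 := by omega
    simp [pvBisectRight, pvALoop, *]
  by_cases c8 : level < 200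
  · have d9 : level < 300 := by omega
    have d10 : level < 450 := by omega
    have d11 : level < 600 := by omega
    have d12 : level < 1000 := by omega
    simp [pvBisectRight, pvALoop, *]
  by_cases c9 : level < 300
  · have d10 : level < 450 := by omega
    have d11 : level < 600 := by omega
    have d12 : level < 1000 := by omega
    simp [pvBisectRight, pvALoop, *]
  by_cases c10 : level < 450
  · have d11 : level < 600 := by omega
    have d12 : level < 1000 := by omega
    simp [pvBisectRight, pvALoop, *]
  by_cases c11 : level < 600
  · have d12 : level < 1000 := by omega
    simp [pvBisectRight, pvALoop, *]
  by_cases c12 : level < 1000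
  · simp [pvBisectRight, pvALoop, *]
  simp [pvBisectRight, pvALoop, *]
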